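-- pv_equiv track=rewrite | github.com/naren-research/memories-of-malice | personality-framework/subset-generation/batch_convert_metatrait_subsets.py | dialogue_to_messages
-- ===== SOURCE A (Python) =====
-- from typing import Dict, List, Optional, Any
--
-- def dialogue_to_messages(
--     dialogue: List[str],
--     system_prompt: Optional[str] = None,
-- ) -> List[Dict[str, str]]:
--     """
--     Convert a dialogue list to OpenAI messages format.
--     Alternates between user and assistant, always starting with user.
--
--     Args:
--         dialogue: List of dialogue turns
--         system_prompt: Optional system prompt to prepend
--
--     Returns:
--         List of message dicts with 'role' and 'content' keys.
--     """
--     messages = []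
--
--     # Add system prompt if provided
--     if system_prompt:
--         messages.append({"role": "system", "content": system_prompt})
--
--     # Convert dialogue turns to user/assistant messages
--     # Alternating pattern: user, assistant, user, assistant, ...
--     for i, turn in enumerate(dialogue):
--         if not turn or not turn.strip():
--             continue
--
--         role = "user" if i % 2 == 0 else "assistant"
--         messages.append({"role": role, "content": turn.strip()})
--
--     # Ensure conversation starts with user and ends with assistant
--     conversation = [m for m in messages if m['role'] != 'system']
--     if not conversation:
--         return messages
--
--     # If starts with assistant, swap all roles
--     if conversation[0]['role'] == 'assistant':
--         for msg in messages:
--             if msg['role'] == 'user':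
--                 msg['role'] = 'assistant'
--             elif msg['role'] == 'assistant':
--                 msg['role'] = 'user'
--
--     return messages
-- ===== SOURCE B (Python) =====
-- def dialogue_to_messages(dialogue, system_prompt=None):
--     """Single-pass rewrite: precompute whether roles must be flipped from the
--     index of the first non-empty turn, instead of post-hoc swapping."""
--     messages = []
--     if system_prompt:
--         messages.append({"role": "system", "content": system_prompt})
--     first = next((i for i, t in enumerate(dialogue) if t and t.strip()), None)
--     flip = first is not None and first % 2 == 1
--     for i, turn in enumerate(dialogue):
--         if turn and turn.strip():
--             role = "user" if (i % 2 == 0) != flip else "assistant"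
--             messages.append({"role": role, "content": turn.strip()})
--     return messages
-- ===== Notes on version B (the rewrite author's own statement) =====
-- stated objective: simpler
-- what changed: B decides the user/assistant assignment up front from the parity of the first non-empty turn's index (one find + one build pass), eliminating A's post-hoc filter of the built message list and its global in-place role-swap loop.
import Mathlib
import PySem

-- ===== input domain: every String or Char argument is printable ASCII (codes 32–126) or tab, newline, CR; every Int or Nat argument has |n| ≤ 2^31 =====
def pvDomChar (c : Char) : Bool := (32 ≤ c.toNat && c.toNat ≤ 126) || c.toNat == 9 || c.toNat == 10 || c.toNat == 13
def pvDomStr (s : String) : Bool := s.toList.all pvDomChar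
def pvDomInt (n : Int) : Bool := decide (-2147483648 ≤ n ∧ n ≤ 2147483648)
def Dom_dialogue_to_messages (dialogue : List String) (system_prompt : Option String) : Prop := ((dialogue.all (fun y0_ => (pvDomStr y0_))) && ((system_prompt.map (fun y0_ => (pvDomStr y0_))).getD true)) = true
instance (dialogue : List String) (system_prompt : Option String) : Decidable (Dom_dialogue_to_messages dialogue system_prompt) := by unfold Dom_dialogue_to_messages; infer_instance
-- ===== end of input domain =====

-- B replaces A's build-then-filter-then-swap with a first-non-empty-turn parity scan and one build pass (simpler; return-value equivalence — A mutates only dicts it created itself).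

-- ===== PORT A =====
-- m['role'] : first-match lookup in the assoc list (all dicts A builds carry "role", so no KeyError)
def pvGetKey (m : List (String × String)) (k : String) : String :=
  ((m.find? (fun p => p.1 == k)).map Prod.snd).getD ""
-- m['role'] = v : overwrite in place, keep position (Python dict assignment on an existing key)
def pvSetKey (m : List (String × String)) (k : String) (v : String) : List (String × String) :=
  m.map (fun p => if p.1 == k then (p.1, v) else p)

def dialogue_to_messages (dialogue : List String) (system_prompt : Option String) : List (List (String × String)) :=
  let messages : List (List (String × String)) :=
    match system_prompt with
    | some s => if s ≠ "" then [[("role", "system"), ("content", s)]] else []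
    | none => []
  let messages := (PySem.List.enumerate dialogue).foldl
    (fun acc p =>
      if p.2 = "" ∨ PySem.Str.strip p.2 = "" then acc
      else acc ++ [[("role", if PySem.Int.mod p.1 2 = 0 then "user" else "assistant"),
                    ("content", PySem.Str.strip p.2)]]) messages
  let conversation := messages.filter (fun m => pvGetKey m "role" ≠ "system")
  match conversation with
  | [] => messages
  | c0 :: _ =>
    if pvGetKey c0 "role" = "assistant" then
      messages.map (fun m =>
        if pvGetKey m "role" = "user" then pvSetKey m "role" "assistant"
        else if pvGetKey m "role" = "assistant" then pvSetKey m "role" "user"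
        else m)
    else messages

-- ===== PORT B =====
def dialogue_to_messages_alt (dialogue : List String) (system_prompt : Option String) : List (List (String × String)) :=
  let messages : List (List (String × String)) :=
    match system_prompt with
    | some s => if s ≠ "" then [[("role", "system"), ("content", s)]] else []
    | none => []
  let first := (PySem.List.enumerate dialogue).find?
    (fun p => !(p.2 == "") && !(PySem.Str.strip p.2 == ""))
  let flip : Bool := match first with
    | some p => PySem.Int.mod p.1 2 == 1
    | none => false
  (PySem.List.enumerate dialogue).foldl
    (fun acc p =>
      if p.2 = "" ∨ PySem.Str.strip p.2 = "" then acc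
      else acc ++ [[("role", if (decide (PySem.Int.mod p.1 2 = 0)) != flip then "user" else "assistant"),
                    ("content", PySem.Str.strip p.2)]]) messages

-- ===== PRECONDITION & SPEC =====
def Spec_dialogue_to_messages (dialogue : List String) (system_prompt : Option String) (out : List (List (String × String))) : Prop := out = dialogue_to_messages_alt dialogue system_prompt
instance (dialogue : List String) (system_prompt : Option String) (out : List (List (String × String))) : Decidable (Spec_dialogue_to_messages dialogue system_prompt out) := by unfold Spec_dialogue_to_messages; infer_instance

-- ===== CLAIM (what is proved, stated in full; the proofs are below) =====
def Claim_equal_dialogue_to_messages : Prop := ∀ (dialogue : List String) (system_prompt : Option String), Dom_dialogue_to_messages dialogue system_prompt → Spec_dialogue_to_messages dialogue system_prompt (dialogue_to_messages dialogue system_prompt)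

-- ===== LEMMAS AND PROOFS =====

-- the message list both folds build, parameterised by the role function
def pvBody (r : Int → String) (s : Int) : List String → List (List (String × String))
  | [] => []
  | t :: ds =>
    (if t = "" ∨ PySem.Str.strip t = "" then []
     else [[("role", r s), ("content", PySem.Str.strip t)]]) ++ pvBody r (s + 1) ds

theorem pvFold_eq (r : Int → String) (ds : List String) : ∀ (s : Int) (acc : List (List (String × String))),
    (PySem.List.enumerate ds s).foldl
      (fun acc p =>
        if p.2 = "" ∨ PySem.Str.strip p.2 = "" then acc
        else acc ++ [[("role", r p.1), ("content", PySem.Str.strip p.2)]]) acc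
    = acc ++ pvBody r s ds := by
  induction ds with
  | nil => intro s acc; simp [PySem.List.enumerate_nil, pvBody]
  | cons t ds ih =>
    intro s acc
    simp only [PySem.List.enumerate_cons, List.foldl_cons, pvBody]
    by_cases h : t = "" ∨ PySem.Str.strip t = "" <;> simp [h, ih]

theorem pvBody_nil_of_find_none (r : Int → String) (ds : List String) : ∀ (s : Int),
    (PySem.List.enumerate ds s).find? (fun p => !(p.2 == "") && !(PySem.Str.strip p.2 == "")) = none →
    pvBody r s ds = [] := by
  induction ds with
  | nil => intro s _; rfl
  | cons t ds ih =>
    intro s h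
    simp only [PySem.List.enumerate_cons, List.find?_cons] at h
    split at h
    · exact absurd h (by simp)
    · rename_i hm
      have ht : t = "" ∨ PySem.Str.strip t = "" := by
        by_contra hc
        rw [not_or] at hc
        simp [hc.1, hc.2] at hm
      simp [pvBody, ht, ih _ h]

theorem pvBody_cons_of_find_some (r : Int → String) (ds : List String) : ∀ (s : Int) (i0 : Int) (t0 : String),
    (PySem.List.enumerate ds s).find? (fun p => !(p.2 == "") && !(PySem.Str.strip p.2 == "")) = some (i0, t0) →
    ∃ rest, pvBody r s ds = [("role", r i0), ("content", PySem.Str.strip t0)] :: rest := by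
  induction ds with
  | nil => intro s i0 t0 h; simp [PySem.List.enumerate_nil] at h
  | cons t ds ih =>
    intro s i0 t0 h
    simp only [PySem.List.enumerate_cons, List.find?_cons] at h
    split at h
    · rename_i hm
      have ht : ¬(t = "" ∨ PySem.Str.strip t = "") := by
        simp only [Bool.and_eq_true, Bool.not_eq_true', beq_eq_false_iff_ne] at hm
        tauto
      obtain ⟨h1, h2⟩ := Prod.mk.injEq .. ▸ Option.some.injEq .. ▸ h
      subst h1; subst h2
      exact ⟨pvBody r (s + 1) ds, by simp [pvBody, ht]⟩
    · rename_i hm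
      have ht : t = "" ∨ PySem.Str.strip t = "" := by
        by_contra hc
        rw [not_or] at hc
        simp [hc.1, hc.2] at hm
      obtain ⟨rest, hrest⟩ := ih (s + 1) i0 t0 h
      exact ⟨rest, by simp [pvBody, ht, hrest]⟩

-- role of a message A builds
theorem pvGetKey_msg (x c : String) : pvGetKey [("role", x), ("content", c)] "role" = x := by
  simp [pvGetKey]

def pvRoleA : Int → String := fun i => if PySem.Int.mod i 2 = 0 then "user" else "assistant"
def pvRoleB (flip : Bool) : Int → String := fun i => if (decide (PySem.Int.mod i 2 = 0)) != flip then "user" else "assistant"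

theorem pvRoleA_ne_system (i : Int) : pvRoleA i ≠ "system" := by
  unfold pvRoleA; split <;> decide

theorem pvFilter_body (r : Int → String) (hr : ∀ i, r i ≠ "system") (ds : List String) : ∀ s,
    (pvBody r s ds).filter (fun m => decide (pvGetKey m "role" ≠ "system")) = pvBody r s ds := by
  induction ds with
  | nil => intro s; rfl
  | cons t ds ih =>
    intro s
    by_cases h : t = "" ∨ PySem.Str.strip t = ""
    · rw [pvBody, if_pos h, List.nil_append]
      exact ih (s + 1)
    · rw [pvBody, if_neg h, List.singleton_append, List.filter_cons]
      rw [if_pos (by simp [pvGetKey_msg, hr s]), ih (s + 1)]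

theorem pvRoleB_false : pvRoleB false = pvRoleA := by
  funext i; simp [pvRoleA, pvRoleB]

-- the swap map A applies
def pvSwap (m : List (String × String)) : List (String × String) :=
  if pvGetKey m "role" = "user" then pvSetKey m "role" "assistant"
  else if pvGetKey m "role" = "assistant" then pvSetKey m "role" "user"
  else m

theorem pvSwap_msg (x c : String) :
    pvSwap [("role", x), ("content", c)]
      = [("role", if x = "user" then "assistant" else if x = "assistant" then "user" else x), ("content", c)] := by
  by_cases h1 : x = "user"
  · simp [pvSwap, pvGetKey_msg, pvSetKey, h1]
  · by_cases h2 : x = "assistant" <;> simp [pvSwap, pvGetKey_msg, pvSetKey, h1, h2]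

theorem pvSwap_body (ds : List String) : ∀ s,
    (pvBody pvRoleA s ds).map pvSwap = pvBody (pvRoleB true) s ds := by
  induction ds with
  | nil => intro s; rfl
  | cons t ds ih =>
    intro s
    by_cases h : t = "" ∨ PySem.Str.strip t = ""
    · simp [pvBody, h, ih]
    · rcases PySem.Int.mod_two_eq s with hm | hm
      · have h1 : pvRoleA s = "user" := by unfold pvRoleA; rw [hm]; decide
        have h2 : pvRoleB true s = "assistant" := by unfold pvRoleB; rw [hm]; decide
        simp only [pvBody, if_neg h, List.map_append, List.map_cons, List.map_nil, pvSwap_msg, ih, h1, h2]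
        simp
      · have h1 : pvRoleA s = "assistant" := by unfold pvRoleA; rw [hm]; decide
        have h2 : pvRoleB true s = "user" := by unfold pvRoleB; rw [hm]; decide
        simp only [pvBody, if_neg h, List.map_append, List.map_cons, List.map_nil, pvSwap_msg, ih, h1, h2]
        simp

theorem pvSwap_sys (s : String) : pvSwap [("role", "system"), ("content", s)] = [("role", "system"), ("content", s)] := by
  simp [pvSwap_msg]

-- A's and B's bodies with the system-prefix generalized (proof helpers)
def pvACore (dialogue : List String) (sys : List (List (String × String))) : List (List (String × String)) :=
  let messages := (PySem.List.enumerate dialogue).foldl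
    (fun acc p =>
      if p.2 = "" ∨ PySem.Str.strip p.2 = "" then acc
      else acc ++ [[("role", if PySem.Int.mod p.1 2 = 0 then "user" else "assistant"),
                    ("content", PySem.Str.strip p.2)]]) sys
  let conversation := messages.filter (fun m => pvGetKey m "role" ≠ "system")
  match conversation with
  | [] => messages
  | c0 :: _ =>
    if pvGetKey c0 "role" = "assistant" then
      messages.map (fun m =>
        if pvGetKey m "role" = "user" then pvSetKey m "role" "assistant"
        else if pvGetKey m "role" = "assistant" then pvSetKey m "role" "user"
        else m)
    else messages

def pvBCore (dialogue : List String) (sys : List (List (String × String))) : List (List (String × String)) :=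
  let first := (PySem.List.enumerate dialogue).find?
    (fun p => !(p.2 == "") && !(PySem.Str.strip p.2 == ""))
  let flip : Bool := match first with
    | some p => PySem.Int.mod p.1 2 == 1
    | none => false
  (PySem.List.enumerate dialogue).foldl
    (fun acc p =>
      if p.2 = "" ∨ PySem.Str.strip p.2 = "" then acc
      else acc ++ [[("role", if (decide (PySem.Int.mod p.1 2 = 0)) != flip then "user" else "assistant"),
                    ("content", PySem.Str.strip p.2)]]) sys

def pvAPost (messages : List (List (String × String))) : List (List (String × String)) :=
  match messages.filter (fun m => pvGetKey m "role" ≠ "system") with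
  | [] => messages
  | c0 :: _ => if pvGetKey c0 "role" = "assistant" then messages.map pvSwap else messages

def pvFlip (dialogue : List String) : Bool :=
  match (PySem.List.enumerate dialogue).find? (fun p => !(p.2 == "") && !(PySem.Str.strip p.2 == "")) with
  | some p => PySem.Int.mod p.1 2 == 1
  | none => false

theorem pvACore_eq (dialogue : List String) (sys : List (List (String × String))) :
    pvACore dialogue sys = pvAPost (sys ++ pvBody pvRoleA 0 dialogue) :=
  congrArg pvAPost (pvFold_eq pvRoleA dialogue 0 sys)

theorem pvBCore_eq (dialogue : List String) (sys : List (List (String × String))) :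
    pvBCore dialogue sys = sys ++ pvBody (pvRoleB (pvFlip dialogue)) 0 dialogue := by
  unfold pvBCore pvFlip
  generalize (PySem.List.enumerate dialogue).find? (fun p => !(p.2 == "") && !(PySem.Str.strip p.2 == "")) = fo
  exact pvFold_eq (pvRoleB (match fo with | some p => PySem.Int.mod p.1 2 == 1 | none => false)) dialogue 0 sys

theorem pvAPost_nil (messages : List (List (String × String)))
    (h : messages.filter (fun m => decide (pvGetKey m "role" ≠ "system")) = []) :
    pvAPost messages = messages := by
  unfold pvAPost; rw [h]

theorem pvAPost_cons (messages : List (List (String × String))) (c0 : List (String × String))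
    (rest : List (List (String × String)))
    (h : messages.filter (fun m => decide (pvGetKey m "role" ≠ "system")) = c0 :: rest) :
    pvAPost messages = if pvGetKey c0 "role" = "assistant" then messages.map pvSwap else messages := by
  unfold pvAPost; rw [h]

theorem pvMain (dialogue : List String) (sys : List (List (String × String)))
    (hsysform : sys = [] ∨ ∃ s, sys = [[("role", "system"), ("content", s)]]) :
    pvACore dialogue sys = pvBCore dialogue sys := by
  have hfiltsys : sys.filter (fun m => decide (pvGetKey m "role" ≠ "system")) = [] := by
    rcases hsysform with h | ⟨s, h⟩ <;> simp [h, pvGetKey_msg]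
  rw [pvACore_eq, pvBCore_eq]
  cases hF : (PySem.List.enumerate dialogue 0).find? (fun p => !(p.2 == "") && !(PySem.Str.strip p.2 == "")) with
  | none =>
    have hflip : pvFlip dialogue = false := by unfold pvFlip; rw [hF]
    rw [hflip, pvRoleB_false, pvBody_nil_of_find_none pvRoleA dialogue 0 hF, List.append_nil]
    exact pvAPost_nil sys hfiltsys
  | some p =>
    obtain ⟨i0, t0⟩ := p
    obtain ⟨rest, hrest⟩ := pvBody_cons_of_find_some pvRoleA dialogue 0 i0 t0 hF
    have hflip : pvFlip dialogue = (PySem.Int.mod i0 2 == 1) := by unfold pvFlip; rw [hF]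
    have hfilt : (sys ++ pvBody pvRoleA 0 dialogue).filter (fun m => decide (pvGetKey m "role" ≠ "system"))
        = [("role", pvRoleA i0), ("content", PySem.Str.strip t0)] :: rest := by
      rw [List.filter_append, hfiltsys, pvFilter_body pvRoleA pvRoleA_ne_system dialogue 0,
          List.nil_append, hrest]
    rcases PySem.Int.mod_two_eq i0 with hm | hm
    · -- first kept turn at an even index: A does not swap, B does not flip
      have hrole : pvRoleA i0 = "user" := by unfold pvRoleA; rw [hm]; decide
      rw [hrole] at hfilt
      rw [hflip, hm, pvAPost_cons _ _ _ hfilt, pvGetKey_msg,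
          if_neg (by decide : ¬ ("user" : String) = "assistant")]
      rw [show ((0 : Int) == 1) = false from rfl, pvRoleB_false]
    · -- first kept turn at an odd index: A swaps every role, B builds them flipped
      have hrole : pvRoleA i0 = "assistant" := by unfold pvRoleA; rw [hm]; decide
      rw [hrole] at hfilt
      have hmapsys : sys.map pvSwap = sys := by
        rcases hsysform with h | ⟨s, h⟩ <;> simp [h, pvSwap_sys]
      rw [hflip, hm, pvAPost_cons _ _ _ hfilt, pvGetKey_msg, if_pos rfl,
          show ((1 : Int) == 1) = true from rfl, List.map_append, hmapsys, pvSwap_body dialogue 0]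

def pvSysOf (sp : Option String) : List (List (String × String)) :=
  match sp with
  | some s => if s ≠ "" then [[("role", "system"), ("content", s)]] else []
  | none => []

theorem pvSysOf_form (sp : Option String) :
    pvSysOf sp = [] ∨ ∃ s, pvSysOf sp = [[("role", "system"), ("content", s)]] := by
  match sp with
  | none => exact Or.inl rfl
  | some s =>
    by_cases h : s = ""
    · simp [pvSysOf, h]
    · exact Or.inr ⟨s, by simp [pvSysOf, h]⟩

-- ===== VERDICT (by name: the statement is the Claim_ definition above) =====
theorem dialogue_to_messages_spec : Claim_equal_dialogue_to_messages := by
  intro dialogue system_prompt _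
  unfold Spec_dialogue_to_messages
  show pvACore dialogue (pvSysOf system_prompt)
      = pvBCore dialogue (pvSysOf system_prompt)
  exact pvMain dialogue (pvSysOf system_prompt) (pvSysOf_form system_prompt)
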